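-- pv_equiv track=rewrite | github.com/AviNoah/Leetcode | problems/prob_2379.py | func
-- ===== SOURCE A (Python) =====
-- def func(blocks: str, k: int):
--     # We will take a sliding window approach and keep track of white and black counts
--     # start and end will both advance by 1
--
--     whites = 0
--     blacks = 0
--
--     # O(k)
--     for i in range(k):
--         if blocks[i] == "W":
--             whites += 1
--         else:
--             blacks += 1
--
--     min_count = whites
--
--     start, end = 0, k - 1
--
--     # O(n-k)
--     for i in range(k, len(blocks)):
--         if blocks[start] == "B":
--             # Lost a black
--             blacks -= 1
--         else:
--             # Lost a white
--             whites -= 1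
--
--         if blocks[end + 1] == "B":
--             # Gained a black
--             blacks += 1
--         else:
--             # Gained a white
--             whites += 1
--
--         # Advance
--         start += 1
--         end += 1
--
--         # compare
--         min_count = min(min_count, whites)
--
--     return min_count
-- ===== SOURCE B (Python) =====
-- def func(blocks: str, k: int):
--     # Sliding the window changes the white count only when a black cell
--     # enters or leaves: every extra 'B' a window holds is one white fewer.
--     # So count the whites of the first window directly, then subtract the
--     # best net gain in blacks any window achieves over the first window,
--     # read off a prefix-sum table of blacks.
--     blacks = [0]
--     for c in blocks:
--         blacks.append(blacks[-1] + (c == "B"))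
--     gain = max(blacks[i + k] - blacks[i] for i in range(len(blocks) - k + 1)) - blacks[k]
--     return blocks[:k].count("W") - gain
-- ===== Notes on version B (the rewrite author's own statement) =====
-- stated objective: alternative
-- what changed: Replaces A's stateful sliding window (five mutable counters, a running min of white counts) with a one-pass prefix-sum table of blacks and a max over window black-gains: the answer is the first window's whites minus the best net black gain over the first window.
import Mathlib
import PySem

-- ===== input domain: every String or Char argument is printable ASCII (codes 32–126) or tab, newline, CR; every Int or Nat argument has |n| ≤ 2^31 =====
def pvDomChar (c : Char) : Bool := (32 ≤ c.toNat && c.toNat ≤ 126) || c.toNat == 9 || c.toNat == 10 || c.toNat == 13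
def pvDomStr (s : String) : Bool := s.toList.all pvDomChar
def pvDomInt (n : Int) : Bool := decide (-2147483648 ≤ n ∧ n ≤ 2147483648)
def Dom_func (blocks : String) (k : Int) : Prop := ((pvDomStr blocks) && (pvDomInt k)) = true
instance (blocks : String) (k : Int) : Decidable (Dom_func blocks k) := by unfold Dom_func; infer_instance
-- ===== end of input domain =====

-- B replaces A's stateful sliding window with a prefix-sum table of blacks and a max over
-- window black-gains; return values agree on Pre_ (neither mutates its input).

-- ===== PORT A =====
def func (blocks : String) (k : Int) : Int :=
  let bs := blocks.toList
  let s1 := (PySem.List.pyRange 0 k 1).foldl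
    (fun (s : Int × Int) i =>
      if PySem.List.pyGetD bs i ' ' == 'W' then (s.1 + 1, s.2) else (s.1, s.2 + 1))
    ((0 : Int), (0 : Int))
  let s2 := (PySem.List.pyRange k (bs.length : Int) 1).foldl
    (fun (s : Int × Int × Int × Int × Int) _i =>
      let wb1 := if PySem.List.pyGetD bs s.2.2.1 ' ' == 'B' then (s.1, s.2.1 - 1) else (s.1 - 1, s.2.1)
      let wb2 := if PySem.List.pyGetD bs (s.2.2.2.1 + 1) ' ' == 'B' then (wb1.1, wb1.2 + 1) else (wb1.1 + 1, wb1.2)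
      (wb2.1, wb2.2, s.2.2.1 + 1, s.2.2.2.1 + 1, min s.2.2.2.2 wb2.1))
    (s1.1, s1.2, (0 : Int), k - 1, s1.1)
  s2.2.2.2.2

-- ===== PORT B =====
def func_alt (blocks : String) (k : Int) : Int :=
  let bs := blocks.toList
  let blacks := bs.foldl
    (fun (p : List Int) c => p ++ [PySem.List.pyGetD p (-1) 0 + (if c == 'B' then 1 else 0)])
    [(0 : Int)]
  let gains := (PySem.List.pyRange 0 ((bs.length : Int) - k + 1) 1).map
    (fun i => PySem.List.pyGetD blacks (i + k) 0 - PySem.List.pyGetD blacks i 0)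
  let gain := (PySem.List.max? gains (fun y => y)).getD 0 - PySem.List.pyGetD blacks k 0
  ((PySem.List.slice bs none (some k)).countP (fun c => c == 'W') : Int) - gain

-- ===== PRECONDITION & SPEC =====
-- Pre_: exactly the inputs on which the Python A returns (on every other k it raises IndexError).
def Pre_func (blocks : String) (k : Int) : Prop :=
  0 ≤ k ∧ k ≤ (blocks.toList.length : Int)
instance (blocks : String) (k : Int) : Decidable (Pre_func blocks k) := by
  unfold Pre_func; infer_instance
def pvWitness_func : String × Int := ("BW", 1)
def Spec_func (blocks : String) (k : Int) (out : Int) : Prop := out = func_alt blocks k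
instance (blocks : String) (k : Int) (out : Int) : Decidable (Spec_func blocks k out) := by
  unfold Spec_func; infer_instance

-- ===== CLAIM (what is proved, stated in full; the proofs are below) =====
def Claim_equal_func : Prop := ∀ (blocks : String) (k : Int),
  Dom_func blocks k → Pre_func blocks k → Spec_func blocks k (func blocks k)

-- ===== LEMMAS AND PROOFS =====

-- prefix count of 'W' among the first j characters, as an Int
def cw (bs : List Char) (j : Nat) : Int := ((bs.take j).countP (fun c => c == 'W') : Int)
-- prefix count of 'B' among the first j characters, as an Int
def cb (bs : List Char) (j : Nat) : Int := ((bs.take j).countP (fun c => c == 'B') : Int)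
-- the value A's `whites` variable holds after the slide has processed indices k..t-1
def wv (bs : List Char) (k t : Int) : Int :=
  cw bs k.toNat + cb bs k.toNat + cb bs (t - k).toNat - cb bs t.toNat

lemma cw_succ (bs : List Char) (t : Nat) (h : t < bs.length) :
    cw bs (t + 1) = cw bs t + (if bs[t] == 'W' then 1 else 0) := by
  unfold cw
  rw [List.take_add_one, List.getElem?_eq_getElem h]
  simp only [Option.toList_some, List.countP_append, List.countP_singleton]
  push_cast
  split <;> simp

lemma cb_succ (bs : List Char) (t : Nat) (h : t < bs.length) :
    cb bs (t + 1) = cb bs t + (if bs[t] == 'B' then 1 else 0) := by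
  unfold cb
  rw [List.take_add_one, List.getElem?_eq_getElem h]
  simp only [Option.toList_some, List.countP_append, List.countP_singleton]
  push_cast
  split <;> simp

-- the running prefix-sum list B's first loop appends (after the seed value a)
def prefB (a : Int) : List Char → List Int
  | [] => []
  | c :: cs => (a + (if c == 'B' then 1 else 0)) :: prefB (a + (if c == 'B' then 1 else 0)) cs

lemma prefB_length (cs : List Char) : ∀ a : Int, (prefB a cs).length = cs.length := by
  induction cs with
  | nil => intro a; rfl
  | cons c cs ih => intro a; simp [prefB, ih]

lemma qfold (bs : List Char) : ∀ (l : List Int) (a : Int),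
    bs.foldl (fun (p : List Int) c => p ++ [PySem.List.pyGetD p (-1) 0 + (if c == 'B' then 1 else 0)]) (l ++ [a])
      = (l ++ [a]) ++ prefB a bs := by
  induction bs with
  | nil => intro l a; simp [prefB]
  | cons c cs ih =>
    intro l a
    simp only [List.foldl_cons, PySem.List.pyGetD_neg_one_append_singleton, prefB]
    rw [show (l ++ [a]) ++ [a + (if c == 'B' then 1 else 0)]
        = (l ++ [a]) ++ [a + (if c == 'B' then 1 else 0)] from rfl, ih]
    simp

lemma prefB_getElem : ∀ (cs : List Char) (a : Int) (j : Nat) (h : j < cs.length),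
    (prefB a cs)[j]'(by rw [prefB_length]; exact h)
      = a + (((cs.take (j + 1)).countP (fun c => c == 'B') : Nat) : Int) := by
  intro cs
  induction cs with
  | nil => intro a j h; simp at h
  | cons c cs ih =>
    intro a j h
    cases j with
    | zero => simp [prefB]
    | succ j =>
      have hj : j < cs.length := by simpa using h
      simp only [prefB, List.getElem_cons_succ, ih _ j hj, List.take_succ_cons,
        List.countP_cons]
      push_cast
      ring

-- blacks as built by func_alt, indexed: blacks[t] = cb bs t for 0 ≤ t ≤ len
lemma q_get (bs : List Char) (t : Int) (h0 : 0 ≤ t) (hn : t ≤ (bs.length : Int)) :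
    PySem.List.pyGetD
      (bs.foldl (fun (p : List Int) c => p ++ [PySem.List.pyGetD p (-1) 0 + (if c == 'B' then 1 else 0)]) [(0 : Int)])
      t 0 = cb bs t.toNat := by
  have hq : (bs.foldl (fun (p : List Int) c => p ++ [PySem.List.pyGetD p (-1) 0 + (if c == 'B' then 1 else 0)]) [(0 : Int)])
      = (0 : Int) :: prefB 0 bs := by
    have := qfold bs [] 0
    simpa using this
  rw [hq]
  obtain ⟨j, rfl⟩ := Int.eq_ofNat_of_zero_le h0
  have hjn : j ≤ bs.length := by omega
  rw [PySem.List.pyGetD_eq_getElem _ _ h0 (by simp [prefB_length]; omega)]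
  simp only [Int.toNat_natCast]
  cases j with
  | zero => simp [cb]
  | succ j =>
    have hj : j < bs.length := by omega
    simp only [List.getElem_cons_succ]
    rw [prefB_getElem bs 0 j hj]
    simp [cb]

-- A's first loop computes (whites, blacks) = (cw m, m - cw m)
lemma loop1 (bs : List Char) : ∀ (m : Nat), m ≤ bs.length →
    (PySem.List.pyRange 0 (m : Int) 1).foldl
      (fun (s : Int × Int) i =>
        if PySem.List.pyGetD bs i ' ' == 'W' then (s.1 + 1, s.2) else (s.1, s.2 + 1))
      ((0 : Int), (0 : Int))
    = (cw bs m, (m : Int) - cw bs m) := by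
  intro m
  induction m with
  | zero => rw [PySem.List.pyRange_one_eq_nil (by omega)]; simp [cw]
  | succ m ih =>
    intro hm
    have hm' : m < bs.length := by omega
    push_cast
    rw [PySem.List.pyRange_one_succ_right (by omega), List.foldl_append,
      ih (by omega)]
    simp only [List.foldl_cons, List.foldl_nil]
    rw [PySem.List.pyGetD_eq_getElem _ _ (by omega) (by omega)]
    simp only [Int.toNat_natCast]
    rw [show (↑m + 1 : Int) = ((m + 1 : Nat) : Int) from by push_cast; ring,
      cw_succ bs m hm']
    split
    · simp
    · simp
      ring

-- A's whites variable steps from wv j to wv (j+1) at slide index j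
lemma wv_step (bs : List Char) (k j : Int) (hk0 : 0 ≤ k) (hkj : k ≤ j)
    (hjn : j < (bs.length : Int)) :
    (if (bs[(j - k).toNat]'(by omega) == 'B') = true then wv bs k j else wv bs k j - 1)
      + (if (bs[j.toNat]'(by omega) == 'B') = true then 0 else 1) = wv bs k (j + 1) := by
  unfold wv
  have e1 : (j + 1).toNat = j.toNat + 1 := by omega
  have e2 : (j + 1 - k).toNat = (j - k).toNat + 1 := by omega
  rw [e1, e2, cb_succ bs j.toNat (by omega), cb_succ bs ((j - k).toNat) (by omega)]
  by_cases h1 : bs[(j - k).toNat]'(by omega) = 'B' <;>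
    by_cases h2 : bs[j.toNat]'(by omega) = 'B' <;>
      simp [h1, h2] <;> ring

-- A's slide: invariant for the second loop (only the min component matters)
lemma loop2 (bs : List Char) (k : Int) (hk0 : 0 ≤ k) :
    ∀ (m : Nat) (j bl mc : Int), j + m = (bs.length : Int) → k ≤ j →
    ((PySem.List.pyRange j (bs.length : Int) 1).foldl
      (fun (s : Int × Int × Int × Int × Int) _i =>
        let wb1 := if PySem.List.pyGetD bs s.2.2.1 ' ' == 'B' then (s.1, s.2.1 - 1) else (s.1 - 1, s.2.1)
        let wb2 := if PySem.List.pyGetD bs (s.2.2.2.1 + 1) ' ' == 'B' then (wb1.1, wb1.2 + 1) else (wb1.1 + 1, wb1.2)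
        (wb2.1, wb2.2, s.2.2.1 + 1, s.2.2.2.1 + 1, min s.2.2.2.2 wb2.1))
      (wv bs k j, bl, j - k, j - 1, mc)).2.2.2.2
    = (PySem.List.pyRange j (bs.length : Int) 1).foldl
        (fun mc t => min mc (wv bs k (t + 1))) mc := by
  intro m
  induction m with
  | zero =>
    intro j bl mc hj hkj
    rw [PySem.List.pyRange_one_eq_nil (by omega)]
    simp
  | succ m ih =>
    intro j bl mc hj hkj
    have hjn : j < (bs.length : Int) := by omega
    rw [PySem.List.pyRange_one_cons (by omega)]
    simp only [List.foldl_cons]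
    rw [show j - 1 + 1 = j from by ring]
    rw [PySem.List.pyGetD_eq_getElem bs ' ' (by omega : (0:Int) ≤ j - k) (by omega),
        PySem.List.pyGetD_eq_getElem bs ' ' (by omega : (0:Int) ≤ j) (by omega)]
    have hst := wv_step bs k j hk0 hkj hjn
    have hj' : (j + 1) + (m : Int) = (bs.length : Int) := by push_cast at hj; omega
    rcases Bool.eq_false_or_eq_true (bs[(j - k).toNat]'(by omega) == 'B') with h1 | h1 <;>
      rcases Bool.eq_false_or_eq_true (bs[j.toNat]'(by omega) == 'B') with h2 | h2 <;>
        simp only [h1, h2, Bool.false_eq_true, if_true, if_false, add_zero] at hst ⊢ <;>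
        rw [hst] <;>
        first
          | (have hih := ih (j + 1) bl (min mc (wv bs k (j + 1))) hj' (by omega);
             rw [show j + 1 - 1 = j from by ring, show j + 1 - k = j - k + 1 from by ring] at hih;
             exact hih)
          | (have hih := ih (j + 1) (bl - 1) (min mc (wv bs k (j + 1))) hj' (by omega);
             rw [show j + 1 - 1 = j from by ring, show j + 1 - k = j - k + 1 from by ring] at hih;
             exact hih)
          | (have hih := ih (j + 1) (bl + 1) (min mc (wv bs k (j + 1))) hj' (by omega);
             rw [show j + 1 - 1 = j from by ring, show j + 1 - k = j - k + 1 from by ring] at hih;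
             exact hih)
          | (have hih := ih (j + 1) (bl - 1 + 1) (min mc (wv bs k (j + 1))) hj' (by omega);
             rw [show j + 1 - 1 = j from by ring, show j + 1 - k = j - k + 1 from by ring] at hih;
             exact hih)

-- min/max duality of the two folds: a running min of (C - g x) is C minus a running max of g x
lemma foldl_min_max (C : Int) (g : Nat → Int) (h : List Nat) : ∀ a : Int,
    h.foldl (fun mc x => min mc (C - g x)) (C - a) = C - h.foldl (fun m x => max m (g x)) a := by
  induction h with
  | nil => intro a; simp
  | cons x t ih =>
    intro a
    simp only [List.foldl_cons]
    rw [show min (C - a) (C - g x) = C - max a (g x) from by omega, ih]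

theorem func_spec : Claim_equal_func := by
  intro blocks k _hdom hpre
  obtain ⟨hk0, hkn⟩ := hpre
  unfold Spec_func func func_alt
  dsimp only
  set bs := blocks.toList with hbs
  set n : Int := (bs.length : Int) with hn
  -- A's first loop
  have h1 := loop1 bs k.toNat (by omega)
  rw [Int.toNat_of_nonneg hk0] at h1
  rw [h1]
  dsimp only
  -- A's second loop
  have hjm : k + ((n - k).toNat : Int) = n := by omega
  have h2 := loop2 bs k hk0 (n - k).toNat k (k - cw bs k.toNat) (cw bs k.toNat) hjm le_rfl
  have hwvk : wv bs k k = cw bs k.toNat := by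
    unfold wv; rw [sub_self]; simp [cb]
  rw [sub_self, hwvk] at h2
  dsimp only at h2
  rw [h2]
  -- B's prefix list of blacks
  set Q := bs.foldl (fun (p : List Int) c => p ++ [PySem.List.pyGetD p (-1) 0 + (if c == 'B' then 1 else 0)]) [(0 : Int)] with hQ
  have hqk := q_get bs k hk0 hkn
  rw [← hQ] at hqk
  rw [hqk, PySem.List.slice_to bs hk0]
  have hcw : cw bs k.toNat = ((List.countP (fun c => c == 'W') (List.take k.toNat bs) : Nat) : Int) := rfl
  rw [← hcw]
  -- rewrite B's gains list through cb
  have hmap : (PySem.List.pyRange 0 (n - k + 1) 1).map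
        (fun i => PySem.List.pyGetD Q (i + k) 0 - PySem.List.pyGetD Q i 0)
      = (PySem.List.pyRange 0 (n - k + 1) 1).map
        (fun i => cb bs (i + k).toNat - cb bs i.toNat) := by
    apply List.map_congr_left
    intro x hx
    rw [PySem.List.mem_pyRange_one] at hx
    have hx1 := q_get bs (x + k) (by omega) (by omega)
    have hx2 := q_get bs x (by omega) (by omega)
    rw [← hQ] at hx1 hx2
    rw [hx1, hx2]
  rw [hmap]
  -- expose the head of the gains list
  have hm1 : (n - k + 1 : Int) = (((n - k).toNat + 1 : Nat) : Int) := by omega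
  rw [hm1, PySem.List.pyRange_zero_natCast, List.range_succ_eq_map]
  simp only [List.map_cons, List.map_map]
  rw [PySem.List.max?_id_cons]
  simp only [Option.getD_some]
  -- the head gain is cb k
  have hcb0 : cb bs (0 : Int).toNat = 0 := by simp [cb]
  rw [show ((0 : Nat) : Int) + k = k from by push_cast; ring] at *
  simp only [Int.toNat_zero] at *
  -- A's fold, reindexed over List.range
  rw [PySem.List.pyRange_one k n, List.foldl_map, List.foldl_map]
  -- both folds over List.range (n-k).toNat: pointwise bodies, then duality
  set C : Int := cw bs k.toNat + cb bs k.toNat with hC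
  have hbody : ∀ (mc : Int) (u : Nat), u ∈ List.range (n - k).toNat →
      min mc (wv bs k (k + (u : Int) + 1)) = min mc (C - (cb bs (((u : Int) + 1 + k).toNat) - cb bs ((u : Int) + 1).toNat)) := by
    intro mc u _hu
    congr 1
    unfold wv
    rw [show (k + (u : Int) + 1 - k : Int) = (u : Int) + 1 from by ring,
      show (k + (u : Int) + 1 : Int) = (u : Int) + 1 + k from by ring]
    ring
  rw [PySem.List.foldl_congr_mem _ _ _ _ hbody]
  simp only [Nat.cast_zero, Int.toNat_zero]
  rw [show cb bs 0 = 0 from by simp [cb], sub_zero,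
    show cw bs k.toNat = C - cb bs k.toNat from by rw [hC]; ring,
    show C - cb bs k.toNat - (List.foldl (fun x y => max x (((fun i => cb bs (i + k).toNat - cb bs i.toNat) ∘ (fun m : Nat => (m : Int)) ∘ Nat.succ) y)) (cb bs k.toNat) (List.range (n - k).toNat) - cb bs k.toNat) = C - List.foldl (fun x y => max x (((fun i => cb bs (i + k).toNat - cb bs i.toNat) ∘ (fun m : Nat => (m : Int)) ∘ Nat.succ) y)) (cb bs k.toNat) (List.range (n - k).toNat) from by ring]
  rw [foldl_min_max C (fun u : Nat => cb bs (((u : Int) + 1 + k).toNat) - cb bs ((u : Int) + 1).toNat) (List.range (n - k).toNat) (cb bs k.toNat)]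
  congr 1
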